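-- pv_equiv track=rewrite | github.com/ProDrifterDK/opencode-planning-hooks | .hermes/plugins/planning-with-files/planning_files.py | extract_current_phase
-- ===== SOURCE A (Python) =====
-- def extract_current_phase(task_plan: str) -> str:
--     lines = task_plan.splitlines()
--     for idx, line in enumerate(lines):
--         stripped = line.strip()
--         if stripped.lower() == "## current phase":
--             for next_line in lines[idx + 1 :]:
--                 candidate = next_line.strip()
--                 if not candidate or candidate.startswith("<!--"):
--                     continue
--                 if candidate.endswith("-->") or candidate.startswith("WHAT:") or candidate.startswith("WHY:") or candidate.startswith("EXAMPLE:"):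
--                     continue
--                 return candidate
--             return stripped
--     current_phase_name = None
--     for line in lines:
--         stripped = line.strip()
--         if stripped.startswith("### Phase"):
--             current_phase_name = stripped
--         if "**status:**" in stripped.lower() and "in_progress" in stripped.lower() and current_phase_name:
--             return current_phase_name
--     if current_phase_name is None:
--         for line in lines:
--             stripped = line.strip()
--             if not (stripped.startswith("|") and stripped.endswith("|")):
--                 continue
--             cells = [cell.strip() for cell in stripped.strip("|").split("|")]
--             if len(cells) < 2 or cells[0].lower() == "phase" or set(cells[0]) == {"-"}:
--                 continue
--             if cells[1].lower() == "in_progress":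
--                 return cells[0]
--     for line in lines:
--         stripped = line.strip()
--         if stripped.startswith("### Phase"):
--             return stripped
--     return "No phase found"
-- ===== SOURCE B (Python) =====
-- # One linear pass that records an index of all facts the priority rules need, then one decision.
--
-- def _candidate_skip(c):
--     return (not c) or c.startswith("<!--")
--
-- def _meta_skip(c):
--     return c.endswith("-->") or c.startswith("WHAT:") or c.startswith("WHY:") or c.startswith("EXAMPLE:")
--
-- def _is_hdr(c):
--     return c.lower() == "## current phase"
--
-- def _is_phase(c):
--     return c.startswith("### Phase")
--
-- def _is_status(c):
--     return "**status:**" in c.lower() and "in_progress" in c.lower()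
--
-- def _table_hit(c):
--     if not (c.startswith("|") and c.endswith("|")):
--         return None
--     cells = [x.strip() for x in c.strip("|").split("|")]
--     if len(cells) < 2 or cells[0].lower() == "phase" or set(cells[0]) == {"-"}:
--         return None
--     if cells[1].lower() == "in_progress":
--         return cells[0]
--     return None
--
-- def extract_current_phase(task_plan: str) -> str:
--     hdr = None            # stripped text of the first '## current phase' header
--     hdr_candidate = None  # first acceptable line after that header
--     cur_phase = None      # most recent '### Phase' line seen so far
--     first_phase = None    # first '### Phase' line
--     phase_status = None   # phase active when an in_progress status line appeared
--     table_hit = None      # first table row whose second cell is 'in_progress'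
--     for line in task_plan.splitlines():
--         s = line.strip()
--         if hdr is not None and hdr_candidate is None and not _candidate_skip(s) and not _meta_skip(s):
--             hdr_candidate = s
--         if hdr is None and _is_hdr(s):
--             hdr = s
--         if _is_phase(s):
--             if first_phase is None:
--                 first_phase = s
--             cur_phase = s
--         if phase_status is None and _is_status(s) and cur_phase is not None:
--             phase_status = cur_phase
--         if table_hit is None:
--             hit = _table_hit(s)
--             if hit is not None:
--                 table_hit = hit
--     if hdr is not None:
--         return hdr_candidate if hdr_candidate is not None else hdr
--     if phase_status is not None:
--         return phase_status
--     if first_phase is not None: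
--         return first_phase
--     if table_hit is not None:
--         return table_hit
--     return "No phase found"
-- ===== Notes on version B (the rewrite author's own statement) =====
-- stated objective: alternative
-- what changed: Replaces A's four separate rescans of the line list (header+lookahead, phase/status, table, first-phase) by one linear pass that records an index of all needed facts, followed by a single priority decision.
import Mathlib
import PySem

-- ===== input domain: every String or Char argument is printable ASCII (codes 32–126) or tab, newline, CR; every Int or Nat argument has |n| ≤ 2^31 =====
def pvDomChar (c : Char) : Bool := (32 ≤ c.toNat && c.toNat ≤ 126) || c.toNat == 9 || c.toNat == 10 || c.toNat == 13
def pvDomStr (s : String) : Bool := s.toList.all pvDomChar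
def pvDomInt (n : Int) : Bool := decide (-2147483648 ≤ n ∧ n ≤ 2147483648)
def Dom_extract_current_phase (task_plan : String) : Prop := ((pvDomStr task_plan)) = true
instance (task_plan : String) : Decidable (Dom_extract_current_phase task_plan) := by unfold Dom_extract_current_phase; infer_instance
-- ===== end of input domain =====

-- B makes ONE pass over the lines recording everything the priority rules need, then decides
-- once; A rescans the line list up to four times.  Shared per-line predicates below are the
-- conditions both Pythons test on a stripped line (helpers in Source B, inline in A's code).

def candidateSkip (c : String) : Bool := c == "" || PySem.Str.startswith c "<!--"

def metaSkip (c : String) : Bool :=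
  PySem.Str.endswith c "-->" || PySem.Str.startswith c "WHAT:" ||
  PySem.Str.startswith c "WHY:" || PySem.Str.startswith c "EXAMPLE:"

def isHdrLine (c : String) : Bool := PySem.Str.lower c == "## current phase"

def isPhaseLine (c : String) : Bool := PySem.Str.startswith c "### Phase"

def isStatusLine (c : String) : Bool :=
  PySem.Str.isIn "**status:**" (PySem.Str.lower c) && PySem.Str.isIn "in_progress" (PySem.Str.lower c)

-- the table-row test: some cells[0] on a row whose second cell is 'in_progress'
-- (set(cells[0]) == {"-"} is PySem.Set.equal of the two sets, exact)
def tableHit? (c : String) : Option String :=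
  if !(PySem.Str.startswith c "|" && PySem.Str.endswith c "|") then none
  else
    let cells := (PySem.Chars.splitOn (PySem.Chars.stripChars c.toList ['|']) ['|']).map PySem.Chars.strip
    if decide (cells.length < 2) || PySem.Chars.lower (cells.getD 0 []) == "phase".toList ||
        PySem.Set.equal (PySem.Set.ofList (cells.getD 0 [])) (PySem.Set.ofList ['-']) then none
    else if PySem.Chars.lower (cells.getD 1 []) == "in_progress".toList then
      some (String.ofList (cells.getD 0 []))
    else none

-- ===== PORT A =====
-- inner loop over lines[idx+1:]: first acceptable candidate, else the header's stripped text
def aScan : List String → String → String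
  | [], stripped => stripped
  | next_line :: rest, stripped =>
    let candidate := PySem.Str.strip next_line
    if candidateSkip candidate then aScan rest stripped
    else if metaSkip candidate then aScan rest stripped
    else candidate

-- first loop: find the '## current phase' header; on a hit A always returns
def aLoop1 : List String → Option String
  | [] => none
  | line :: rest =>
    let stripped := PySem.Str.strip line
    if isHdrLine stripped then some (aScan rest stripped) else aLoop1 rest

-- second loop: track the last '### Phase' line; .inl = early return at an in_progress status
-- line, .inr = fell through with the final current_phase_name.  Python's truthiness test
-- 'and current_phase_name' is isSome here: every stored value starts with '### Phase', hence
-- is non-empty, and the initial value passed in is none.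
def aLoop2 : List String → Option String → Sum String (Option String)
  | [], cur => .inr cur
  | line :: rest, cur =>
    let stripped := PySem.Str.strip line
    let cur' := if isPhaseLine stripped then some stripped else cur
    if isStatusLine stripped && cur'.isSome then .inl (cur'.getD "")
    else aLoop2 rest cur'

-- third loop: first table row whose second cell is 'in_progress'
def aLoop3 : List String → Option String
  | [] => none
  | line :: rest =>
    match tableHit? (PySem.Str.strip line) with
    | some t => some t
    | none => aLoop3 rest

-- fourth loop: first '### Phase' line
def aLoop4 : List String → Option String
  | [] => none
  | line :: rest =>
    let stripped := PySem.Str.strip line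
    if isPhaseLine stripped then some stripped else aLoop4 rest

def extract_current_phase (task_plan : String) : String :=
  let lines := PySem.Str.splitlines task_plan
  match aLoop1 lines with
  | some r => r
  | none =>
    match aLoop2 lines none with
    | .inl p => p
    | .inr cur =>
      match (if cur.isNone then aLoop3 lines else none) with
      | some t => t
      | none =>
        match aLoop4 lines with
        | some p => p
        | none => "No phase found"

-- ===== PORT B =====
structure BState where
  hdr : Option String
  hdrCandidate : Option String
  curPhase : Option String
  firstPhase : Option String
  phaseStatus : Option String
  tableHit : Option String

-- one loop body: the five recorders applied in Source B's order
def bCand (st : BState) (s : String) : BState :=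
  if st.hdr.isSome && st.hdrCandidate.isNone && !candidateSkip s && !metaSkip s then
    { st with hdrCandidate := some s }
  else st

def bHdr (st : BState) (s : String) : BState :=
  if st.hdr.isNone && isHdrLine s then { st with hdr := some s } else st

def bPhase (st : BState) (s : String) : BState :=
  if isPhaseLine s then
    { st with firstPhase := if st.firstPhase.isNone then some s else st.firstPhase,
              curPhase := some s }
  else st

def bStatus (st : BState) (s : String) : BState :=
  if st.phaseStatus.isNone && isStatusLine s && st.curPhase.isSome then
    { st with phaseStatus := st.curPhase }
  else st

def bTable (st : BState) (s : String) : BState :=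
  if st.tableHit.isNone then
    match tableHit? s with
    | some t => { st with tableHit := some t }
    | none => st
  else st

def bStep (st : BState) (line : String) : BState :=
  let s := PySem.Str.strip line
  bTable (bStatus (bPhase (bHdr (bCand st s) s) s) s) s

-- the final priority decision
def bFinish (st : BState) : String :=
  match st.hdr with
  | some h => st.hdrCandidate.getD h
  | none =>
    match st.phaseStatus with
    | some p => p
    | none =>
      match st.firstPhase with
      | some p => p
      | none =>
        match st.tableHit with
        | some t => t
        | none => "No phase found"

def extract_current_phase_alt (task_plan : String) : String :=
  bFinish ((PySem.Str.splitlines task_plan).foldl bStep ⟨none, none, none, none, none, none⟩)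

-- ===== PRECONDITION & SPEC =====
def Spec_extract_current_phase (task_plan : String) (out : String) : Prop := out = extract_current_phase_alt task_plan
instance (task_plan : String) (out : String) : Decidable (Spec_extract_current_phase task_plan out) := by unfold Spec_extract_current_phase; infer_instance

-- ===== CLAIM (what is proved, stated in full; the proofs are below) =====
def Claim_equal_extract_current_phase : Prop := ∀ (task_plan : String), Dom_extract_current_phase task_plan → Spec_extract_current_phase task_plan (extract_current_phase task_plan)

-- ===== LEMMAS AND PROOFS =====

-- fields each sub-step leaves unchanged
theorem bCand_hdr (st : BState) (s : String) : (bCand st s).hdr = st.hdr := by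
  unfold bCand; split <;> rfl
theorem bCand_curPhase (st : BState) (s : String) : (bCand st s).curPhase = st.curPhase := by
  unfold bCand; split <;> rfl
theorem bCand_firstPhase (st : BState) (s : String) : (bCand st s).firstPhase = st.firstPhase := by
  unfold bCand; split <;> rfl
theorem bCand_phaseStatus (st : BState) (s : String) : (bCand st s).phaseStatus = st.phaseStatus := by
  unfold bCand; split <;> rfl
theorem bCand_tableHit (st : BState) (s : String) : (bCand st s).tableHit = st.tableHit := by
  unfold bCand; split <;> rfl
theorem bHdr_hdrCandidate (st : BState) (s : String) : (bHdr st s).hdrCandidate = st.hdrCandidate := by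
  unfold bHdr; split <;> rfl
theorem bHdr_curPhase (st : BState) (s : String) : (bHdr st s).curPhase = st.curPhase := by
  unfold bHdr; split <;> rfl
theorem bHdr_firstPhase (st : BState) (s : String) : (bHdr st s).firstPhase = st.firstPhase := by
  unfold bHdr; split <;> rfl
theorem bHdr_phaseStatus (st : BState) (s : String) : (bHdr st s).phaseStatus = st.phaseStatus := by
  unfold bHdr; split <;> rfl
theorem bHdr_tableHit (st : BState) (s : String) : (bHdr st s).tableHit = st.tableHit := by
  unfold bHdr; split <;> rfl
theorem bPhase_hdr (st : BState) (s : String) : (bPhase st s).hdr = st.hdr := by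
  unfold bPhase; split <;> rfl
theorem bPhase_hdrCandidate (st : BState) (s : String) : (bPhase st s).hdrCandidate = st.hdrCandidate := by
  unfold bPhase; split <;> rfl
theorem bPhase_phaseStatus (st : BState) (s : String) : (bPhase st s).phaseStatus = st.phaseStatus := by
  unfold bPhase; split <;> rfl
theorem bPhase_tableHit (st : BState) (s : String) : (bPhase st s).tableHit = st.tableHit := by
  unfold bPhase; split <;> rfl
theorem bStatus_hdr (st : BState) (s : String) : (bStatus st s).hdr = st.hdr := by
  unfold bStatus; split <;> rfl
theorem bStatus_hdrCandidate (st : BState) (s : String) : (bStatus st s).hdrCandidate = st.hdrCandidate := by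
  unfold bStatus; split <;> rfl
theorem bStatus_curPhase (st : BState) (s : String) : (bStatus st s).curPhase = st.curPhase := by
  unfold bStatus; split <;> rfl
theorem bStatus_firstPhase (st : BState) (s : String) : (bStatus st s).firstPhase = st.firstPhase := by
  unfold bStatus; split <;> rfl
theorem bStatus_tableHit (st : BState) (s : String) : (bStatus st s).tableHit = st.tableHit := by
  unfold bStatus; split <;> rfl
theorem bTable_hdr (st : BState) (s : String) : (bTable st s).hdr = st.hdr := by
  unfold bTable; split <;> (try split) <;> rfl
theorem bTable_hdrCandidate (st : BState) (s : String) : (bTable st s).hdrCandidate = st.hdrCandidate := by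
  unfold bTable; split <;> (try split) <;> rfl
theorem bTable_curPhase (st : BState) (s : String) : (bTable st s).curPhase = st.curPhase := by
  unfold bTable; split <;> (try split) <;> rfl
theorem bTable_firstPhase (st : BState) (s : String) : (bTable st s).firstPhase = st.firstPhase := by
  unfold bTable; split <;> (try split) <;> rfl
theorem bTable_phaseStatus (st : BState) (s : String) : (bTable st s).phaseStatus = st.phaseStatus := by
  unfold bTable; split <;> (try split) <;> rfl

-- the field each sub-step updates
theorem bCand_hdrCandidate (st : BState) (s : String) :
    (bCand st s).hdrCandidate =
      if st.hdr.isSome && st.hdrCandidate.isNone && !candidateSkip s && !metaSkip s then some s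
      else st.hdrCandidate := by
  unfold bCand; split <;> simp_all
theorem bHdr_hdr (st : BState) (s : String) :
    (bHdr st s).hdr = if st.hdr.isNone && isHdrLine s then some s else st.hdr := by
  unfold bHdr; split <;> simp_all
theorem bPhase_curPhase (st : BState) (s : String) :
    (bPhase st s).curPhase = if isPhaseLine s then some s else st.curPhase := by
  unfold bPhase; split <;> simp_all
theorem bPhase_firstPhase (st : BState) (s : String) :
    (bPhase st s).firstPhase =
      if isPhaseLine s && st.firstPhase.isNone then some s else st.firstPhase := by
  unfold bPhase; split <;> cases h : st.firstPhase <;> simp_all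
theorem bStatus_phaseStatus (st : BState) (s : String) :
    (bStatus st s).phaseStatus =
      if st.phaseStatus.isNone && isStatusLine s && st.curPhase.isSome then st.curPhase
      else st.phaseStatus := by
  unfold bStatus; split <;> simp_all
theorem bTable_tableHit (st : BState) (s : String) :
    (bTable st s).tableHit =
      match st.tableHit with
      | some t => some t
      | none => tableHit? s := by
  unfold bTable; cases h : st.tableHit with
  | some t => simp [h]
  | none => simp only [h, Option.isNone_none, if_pos]; split <;> simp_all

-- composite projections of one whole bStep (s abbreviates the stripped line)
theorem bStep_hdr (st : BState) (l : String) :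
    (bStep st l).hdr =
      if st.hdr.isNone && isHdrLine (PySem.Str.strip l) then some (PySem.Str.strip l)
      else st.hdr := by
  simp only [bStep, bTable_hdr, bStatus_hdr, bPhase_hdr, bHdr_hdr, bCand_hdr]
theorem bStep_hdrCandidate (st : BState) (l : String) :
    (bStep st l).hdrCandidate =
      if st.hdr.isSome && st.hdrCandidate.isNone && !candidateSkip (PySem.Str.strip l) &&
          !metaSkip (PySem.Str.strip l) then some (PySem.Str.strip l)
      else st.hdrCandidate := by
  simp only [bStep, bTable_hdrCandidate, bStatus_hdrCandidate, bPhase_hdrCandidate,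
    bHdr_hdrCandidate, bCand_hdrCandidate]
theorem bStep_curPhase (st : BState) (l : String) :
    (bStep st l).curPhase =
      if isPhaseLine (PySem.Str.strip l) then some (PySem.Str.strip l) else st.curPhase := by
  simp only [bStep, bTable_curPhase, bStatus_curPhase, bPhase_curPhase, bHdr_curPhase,
    bCand_curPhase]
theorem bStep_firstPhase (st : BState) (l : String) :
    (bStep st l).firstPhase =
      if isPhaseLine (PySem.Str.strip l) && st.firstPhase.isNone then some (PySem.Str.strip l)
      else st.firstPhase := by
  simp only [bStep, bTable_firstPhase, bStatus_firstPhase, bPhase_firstPhase, bHdr_firstPhase,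
    bCand_firstPhase]
theorem bStep_phaseStatus (st : BState) (l : String) :
    (bStep st l).phaseStatus =
      if st.phaseStatus.isNone && isStatusLine (PySem.Str.strip l) &&
          (if isPhaseLine (PySem.Str.strip l) then some (PySem.Str.strip l) else st.curPhase).isSome then
        (if isPhaseLine (PySem.Str.strip l) then some (PySem.Str.strip l) else st.curPhase)
      else st.phaseStatus := by
  simp only [bStep, bTable_phaseStatus, bStatus_phaseStatus, bPhase_phaseStatus, bHdr_phaseStatus,
    bCand_phaseStatus, bPhase_curPhase, bHdr_curPhase, bCand_curPhase]
theorem bStep_tableHit (st : BState) (l : String) :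
    (bStep st l).tableHit =
      match st.tableHit with
      | some t => some t
      | none => tableHit? (PySem.Str.strip l) := by
  simp only [bStep, bTable_tableHit, bStatus_tableHit, bPhase_tableHit, bHdr_tableHit,
    bCand_tableHit]

-- after the header has been seen: the fold returns the recorded candidate, else A's lookahead
theorem postHdr (lines : List String) (st : BState) (h : String) (hh : st.hdr = some h) :
    bFinish (lines.foldl bStep st) = st.hdrCandidate.getD (aScan lines h) := by
  induction lines generalizing st with
  | nil => simp [bFinish, hh, aScan]
  | cons l rest ih =>
    simp only [List.foldl_cons]
    have hh' : (bStep st l).hdr = some h := by rw [bStep_hdr]; simp [hh]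
    rw [ih (bStep st l) hh']
    rw [bStep_hdrCandidate]
    cases hc : st.hdrCandidate with
    | some c => simp [hh, hc]
    | none =>
      simp only [hh, hc, Option.isSome_some, Option.isNone_none, Bool.true_and]
      by_cases h1 : candidateSkip (PySem.Str.strip l) = true
      · simp [aScan, h1]
      · by_cases h2 : metaSkip (PySem.Str.strip l) = true
        · simp [aScan, h1, h2]
        · simp [aScan, h1, h2]

-- generalized A-side value used by the fold invariant
def gVal (st : BState) (lines : List String) : String :=
  match aLoop1 lines with
  | some r => r
  | none =>
    match (match st.phaseStatus with | some p => Sum.inl p | none => aLoop2 lines st.curPhase) with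
    | .inl p => p
    | .inr _ =>
      match (match st.firstPhase with | some p => some p | none => aLoop4 lines) with
      | some p => p
      | none =>
        match (match st.tableHit with | some t => some t | none => aLoop3 lines) with
        | some t => t
        | none => "No phase found"

-- before the header: the fold computes gVal
theorem preHdr (lines : List String) (st : BState) (hh : st.hdr = none)
    (hc : st.hdrCandidate = none) :
    bFinish (lines.foldl bStep st) = gVal st lines := by
  induction lines generalizing st with
  | nil =>
    simp only [List.foldl_nil, gVal, aLoop1, aLoop2, aLoop4, aLoop3, bFinish, hh]
    cases hps : st.phaseStatus with
    | some p => simp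
    | none =>
      cases hfp : st.firstPhase with
      | some p => simp
      | none =>
        cases hth : st.tableHit with
        | some t => simp
        | none => simp
  | cons l rest ih =>
    simp only [List.foldl_cons]
    cases hHdr : isHdrLine (PySem.Str.strip l) with
    | true =>
      have hh' : (bStep st l).hdr = some (PySem.Str.strip l) := by
        rw [bStep_hdr]; simp [hh, hHdr]
      have hc' : (bStep st l).hdrCandidate = none := by
        rw [bStep_hdrCandidate]; simp [hh, hc]
      rw [postHdr rest (bStep st l) _ hh', hc']
      simp [gVal, aLoop1, hHdr]
    | false =>
      have hh' : (bStep st l).hdr = none := by rw [bStep_hdr]; simp [hh, hHdr]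
      have hc' : (bStep st l).hdrCandidate = none := by
        rw [bStep_hdrCandidate]; simp [hh, hc]
      rw [ih (bStep st l) hh' hc']
      -- gVal st (l :: rest) = gVal (bStep st l) rest, component by component
      simp only [gVal, aLoop1, hHdr, Bool.false_eq_true, if_false]
      rw [bStep_phaseStatus, bStep_curPhase, bStep_firstPhase, bStep_tableHit]
      cases hps : st.phaseStatus with
      | some p => simp
      | none =>
        simp only [Option.isNone_none, Bool.true_and]
        simp only [aLoop2]
        cases hSt : (isStatusLine (PySem.Str.strip l) &&
            (if isPhaseLine (PySem.Str.strip l) then some (PySem.Str.strip l) else st.curPhase).isSome) with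
        | true =>
          rcases Bool.and_eq_true_iff.mp hSt with ⟨hs1, hs2⟩
          cases hcur : (if isPhaseLine (PySem.Str.strip l) then some (PySem.Str.strip l) else st.curPhase) with
          | none => rw [hcur] at hs2; simp at hs2
          | some q =>
            simp only [hcur] at hs2 ⊢
            cases h1r : aLoop1 rest <;> simp [hs1, hs2]
        | false =>
          simp only [hSt, Bool.false_eq_true, if_false]
          cases hfp : st.firstPhase with
          | some p =>
            have : (isPhaseLine (PySem.Str.strip l) && st.firstPhase.isNone) = false := by
              simp [hfp]
            simp [this]
          | none =>
            simp only [hfp, Option.isNone_none, Bool.and_true]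
            cases hPh : isPhaseLine (PySem.Str.strip l) with
            | true => simp [aLoop4, hPh]
            | false =>
              simp only [aLoop4, hPh, Bool.false_eq_true, if_false]
              cases hth : st.tableHit <;>
                cases hhit : tableHit? (PySem.Str.strip l) <;>
                  simp [hth, hhit, aLoop3]

-- the final current_phase_name of loop 2 is empty iff there was no '### Phase' line at all
theorem aLoop2_isNone (lines : List String) :
    ∀ (cur0 cur : Option String), aLoop2 lines cur0 = .inr cur →
      cur.isNone = (cur0.isNone && (aLoop4 lines).isNone) := by
  induction lines with
  | nil => intro cur0 cur h; simp only [aLoop2] at h; cases h; simp [aLoop4]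
  | cons l rest ih =>
    intro cur0 cur h
    simp only [aLoop2] at h
    cases hPh : isPhaseLine (PySem.Str.strip l) with
    | true =>
      rw [hPh] at h
      simp only [if_pos] at h
      by_cases hSt : (isStatusLine (PySem.Str.strip l) && (some (PySem.Str.strip l)).isSome) = true
      · rw [if_pos hSt] at h; cases h
      · rw [if_neg hSt] at h
        have := ih _ _ h
        simp only [Option.isNone_some, Bool.false_and] at this
        simp [aLoop4, hPh, this]
    | false =>
      rw [hPh] at h
      simp only [Bool.false_eq_true, if_false] at h
      by_cases hSt : (isStatusLine (PySem.Str.strip l) && cur0.isSome) = true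
      · rw [if_pos hSt] at h; cases h
      · rw [if_neg hSt] at h
        rw [ih _ _ h]
        simp [aLoop4, hPh]

-- ===== VERDICT (by name: the statement is the Claim_ definition above) =====
theorem extract_current_phase_spec : Claim_equal_extract_current_phase := by
  unfold Claim_equal_extract_current_phase
  intro t _
  unfold Spec_extract_current_phase extract_current_phase extract_current_phase_alt
  rw [preHdr (PySem.Str.splitlines t) ⟨none, none, none, none, none, none⟩ rfl rfl]
  generalize (PySem.Str.splitlines t) = lines
  simp only [gVal]
  cases h1 : aLoop1 lines with
  | some r => rfl
  | none =>
    cases h2 : aLoop2 lines none with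
    | inl p => rfl
    | inr cur =>
      have hn := aLoop2_isNone lines none cur h2
      simp only [Option.isNone_none, Bool.true_and] at hn
      cases hcur : cur with
      | none =>
        have h4 : aLoop4 lines = none := by
          rw [hcur] at hn
          cases h4 : aLoop4 lines
          · rfl
          · rw [h4] at hn; simp at hn
        cases h3 : aLoop3 lines <;> simp [h4, h3]
      | some c =>
        rw [hcur] at hn
        cases h4 : aLoop4 lines with
        | none => rw [h4] at hn; simp at hn
        | some p => simp [h4]
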